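-- pv_equiv track=rewrite | github.com/SpionSkummis/Advent-of-Code-2018 | Erik/Day13.py | replaceCarts
-- ===== SOURCE A (Python) =====
-- def replaceCarts(rawMap):
--     replaceMap = [""]*len(rawMap)
--     for i in range(0,len(rawMap)):
--         step1 = rawMap[i].replace("<","-")
--         step2 = step1.replace(">","-")
--         step3 = step2.replace("^","|")
--         replaceMap[i] = step3.replace("v","|")
--     return replaceMap.copy()
-- ===== SOURCE B (Python) =====
-- def replaceCarts(rawMap):
--     result = []
--     for line in rawMap:
--         out = []
--         for c in line:
--             if c == '<' or c == '>':
--                 out.append('-')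
--             elif c == '^' or c == 'v':
--                 out.append('|')
--             else:
--                 out.append(c)
--         result.append(''.join(out))
--     return result
-- ===== Notes on version B (the rewrite author's own statement) =====
-- stated objective: idiomatic
-- what changed: Replaces A's four sequential whole-string .replace scans per line with a single per-character pass that maps each cart character to its track character and joins the result.
import Mathlib
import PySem

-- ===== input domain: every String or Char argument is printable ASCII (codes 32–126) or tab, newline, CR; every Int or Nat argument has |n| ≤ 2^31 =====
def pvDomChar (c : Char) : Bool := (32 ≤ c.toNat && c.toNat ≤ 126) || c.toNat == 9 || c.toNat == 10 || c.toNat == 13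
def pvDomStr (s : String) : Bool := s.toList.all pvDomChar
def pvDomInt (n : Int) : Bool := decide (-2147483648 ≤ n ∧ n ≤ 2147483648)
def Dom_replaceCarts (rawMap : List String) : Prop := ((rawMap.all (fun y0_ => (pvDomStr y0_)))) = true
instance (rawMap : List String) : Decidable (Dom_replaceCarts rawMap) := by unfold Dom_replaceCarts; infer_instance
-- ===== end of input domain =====

-- B replaces A's four sequential whole-string .replace scans per line with one per-character pass (idiomatic; same cost).

-- ===== PORT A =====
-- literal port of A: pre-sized list, index loop over range(0, len), four .replace steps, final copy is identity on the value
def replaceCarts (rawMap : List String) : List String :=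
  let replaceMap := List.replicate rawMap.length ""
  let replaceMap := (PySem.List.pyRange 0 rawMap.length 1).foldl (fun m i =>
    let step1 := PySem.Str.replace (PySem.List.pyGetD rawMap i "") "<" "-"
    let step2 := PySem.Str.replace step1 ">" "-"
    let step3 := PySem.Str.replace step2 "^" "|"
    m.set i.toNat (PySem.Str.replace step3 "v" "|")) replaceMap
  replaceMap

-- ===== PORT B =====
def pvMapChar (c : Char) : Char :=
  if c = '<' || c = '>' then '-'
  else if c = '^' || c = 'v' then '|'
  else c

def replaceCarts_alt (rawMap : List String) : List String :=
  rawMap.foldl (fun result line =>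
    result ++ [String.ofList (line.toList.foldl (fun out c => out ++ [pvMapChar c]) [])]) []

-- ===== PRECONDITION & SPEC =====
def Spec_replaceCarts (rawMap : List String) (out : List String) : Prop := out = replaceCarts_alt rawMap
instance (rawMap : List String) (out : List String) : Decidable (Spec_replaceCarts rawMap out) := by unfold Spec_replaceCarts; infer_instance

-- ===== CLAIM (what is proved, stated in full; the proofs are below) =====
def Claim_equal_replaceCarts : Prop := ∀ (rawMap : List String), Dom_replaceCarts rawMap → Spec_replaceCarts rawMap (replaceCarts rawMap)

-- ===== LEMMAS AND PROOFS =====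

theorem go_single (o n : Char) :
    ∀ (l : List Char) (acc : List Char) (fuel : Nat), l.length ≤ fuel →
      PySem.Chars.replace.go [o] [n] fuel l acc
        = acc.reverse ++ l.map (fun c => if c = o then n else c) := by
  intro l
  induction l with
  | nil =>
      intro acc fuel _
      cases fuel <;> simp [PySem.Chars.replace.go]
  | cons c t ih =>
      intro acc fuel hf
      cases fuel with
      | zero => simp at hf
      | succ m =>
          simp only [PySem.Chars.replace.go, List.isPrefixOf, Bool.and_true,
            List.length_cons, List.drop_succ_cons, 
            List.reverse_cons, List.reverse_nil, List.nil_append, List.map_cons]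
          by_cases h : c = o
          · rw [if_pos (by simp [h])]
            simp only [List.length_nil, List.drop_zero, List.singleton_append]
            rw [ih (n :: acc) m (by simpa using hf)]
            simp [h]
          · rw [if_neg (by simp; exact fun e => h e.symm)]
            rw [ih (c :: acc) m (by simpa using hf)]
            simp [h]

theorem replace_single (o n : Char) (s : List Char) :
    PySem.Chars.replace s [o] [n] = s.map (fun c => if c = o then n else c) := by
  unfold PySem.Chars.replace
  simp only [List.isEmpty_cons, if_neg Bool.false_ne_true]
  rw [go_single o n s [] s.length le_rfl]
  simp

theorem chain_eq_mapChar (c : Char) :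
    (if (if (if (if c = '<' then '-' else c) = '>' then '-'
        else (if c = '<' then '-' else c)) = '^' then '|'
        else (if (if c = '<' then '-' else c) = '>' then '-'
        else (if c = '<' then '-' else c))) = 'v' then '|'
        else (if (if (if c = '<' then '-' else c) = '>' then '-'
        else (if c = '<' then '-' else c)) = '^' then '|'
        else (if (if c = '<' then '-' else c) = '>' then '-'
        else (if c = '<' then '-' else c)))) = pvMapChar c := by
  unfold pvMapChar
  split_ifs <;> simp_all

theorem fold_snoc_chars (l : List Char) (acc : List Char) :
    l.foldl (fun out c => out ++ [pvMapChar c]) acc = acc ++ l.map pvMapChar := by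
  induction l generalizing acc with
  | nil => simp
  | cons c t ih => simp only [List.foldl_cons, List.map_cons]; rw [ih]; simp

theorem lineA_eq_lineB (s : String) :
    PySem.Str.replace (PySem.Str.replace (PySem.Str.replace (PySem.Str.replace s "<" "-") ">" "-") "^" "|") "v" "|"
      = String.ofList (s.toList.foldl (fun out c => out ++ [pvMapChar c]) []) := by
  apply String.ext
  simp only [PySem.Str.toList_replace, String.toList_ofList]
  have h1 : ("<" : String).toList = ['<'] := rfl
  have h2 : (">" : String).toList = ['>'] := rfl
  have h3 : ("^" : String).toList = ['^'] := rfl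
  have h4 : ("v" : String).toList = ['v'] := rfl
  have h5 : ("-" : String).toList = ['-'] := rfl
  have h6 : ("|" : String).toList = ['|'] := rfl
  rw [h1, h2, h3, h4, h5, h6, replace_single, replace_single, replace_single, replace_single,
    fold_snoc_chars]
  simp only [List.nil_append, List.map_map]
  apply List.map_congr_left
  intro c _
  exact chain_eq_mapChar c

theorem foldl_append_map (l : List String) (acc : List String) :
    l.foldl (fun result line =>
      result ++ [String.ofList (line.toList.foldl (fun out c => out ++ [pvMapChar c]) [])]) acc
      = acc ++ l.map (fun line => String.ofList (line.toList.foldl (fun out c => out ++ [pvMapChar c]) [])) := by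
  induction l generalizing acc with
  | nil => simp
  | cons x t ih => simp only [List.foldl_cons, List.map_cons]; rw [ih]; simp

-- the index-assignment loop over range(k, len) turns the suffix from k on into its mapped image
theorem set_loop (l : List String) (g : String → String) :
    ∀ (fuel k : Nat) (m : List String), m.length = l.length → k + fuel = l.length →
      (PySem.List.pyRange (k : Int) (l.length : Int) 1).foldl
        (fun m i => m.set i.toNat (g (PySem.List.pyGetD l i ""))) m
        = m.take k ++ (l.drop k).map g := by
  intro fuel
  induction fuel with
  | zero =>
      intro k m hm hk
      rw [PySem.List.pyRange_one_eq_nil (by omega)]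
      have h1 : (l.drop k).map g = [] := by
        rw [List.drop_of_length_le (by omega)]; rfl
      rw [h1]
      simp [List.take_of_length_le (show m.length ≤ k by omega)]
  | succ f ih =>
      intro k m hm hk
      have hkl : k < l.length := by omega
      rw [PySem.List.pyRange_one_cons (by exact_mod_cast hkl)]
      simp only [List.foldl_cons]
      have hget : PySem.List.pyGetD l (k : Int) "" = l[k] := by
        rw [PySem.List.pyGetD_of_nonneg l "" (by positivity)]
        simp [List.getD_eq_getElem?_getD, List.getElem?_eq_getElem hkl]
      have hcast : ((k : Int) + 1) = ((k + 1 : Nat) : Int) := by push_cast; ring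
      rw [hcast, ih (k + 1) _ (by simp [hm]) (by omega)]
      rw [hget]
      simp only [Int.toNat_natCast]
      have htake : (m.set k (g l[k])).take (k + 1) = m.take k ++ [g l[k]] := by
        rw [List.take_add_one, List.getElem?_set_self (by omega)]
        simp [List.take_set, List.set_eq_of_length_le (show (m.take k).length ≤ k by simp)]
      rw [htake]
      have hdrop : l.drop k = l[k] :: l.drop (k + 1) := List.drop_eq_getElem_cons hkl
      rw [hdrop]
      simp only [List.map_cons, List.append_assoc, List.singleton_append]

-- ===== VERDICT (by name: the statement is the Claim_ definition above) =====
theorem replaceCarts_spec : Claim_equal_replaceCarts := by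
  intro rawMap _
  unfold Spec_replaceCarts replaceCarts replaceCarts_alt
  dsimp only
  rw [foldl_append_map]
  have h := set_loop rawMap
    (fun s => PySem.Str.replace (PySem.Str.replace (PySem.Str.replace (PySem.Str.replace s "<" "-") ">" "-") "^" "|") "v" "|")
    rawMap.length 0 (List.replicate rawMap.length "") (by simp) (by omega)
  simp only [Int.natCast_zero] at h
  rw [h]
  simp only [List.take_zero, List.drop_zero, List.nil_append]
  apply List.map_congr_left
  intro s _
  exact lineA_eq_lineB s
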